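-- pv_equiv track=rewrite | github.com/ranley123/Leetcode | MaxOfMinAltitudes.py | func
-- ===== SOURCE A (Python) =====
-- def func(matrix):
--     # row = len(matrix)
--     # col = len(matrix[0])
--     # dp = [[0] * row]
--
--     # for i in range(row):
--     #     for j in range(col):
--     #         if i == 0 and j == 0:
--     #             dp[i][j] = matrix[i][j]
--     #         elif i == 0:
--     #             dp[i][j] = min(matrix[i][j], matrix[i][j - 1])
--     #         elif j == 0:
--     #             dp[i][j] = min(matrix[i][j], matrix[i - 1][j])
--     #         else:
--     #             dp[i][j] = min(matrix[i][j], max(dp[i - 1][j], dp[i][j - 1])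
--     # return dp[-1][-1]
--     if not matrix or not matrix[0]:
--         return 0
--
--     n, m = len(matrix), len(matrix[0])
--
--     dp = [[0] * m for _ in range(n)]
--
--     for i in range(n):
--         for j in range(m):
--             if i == 0 and j == 0:
--                 dp[i][j] = matrix[i][j]
--             elif i == 0:
--                 dp[i][j] = min(matrix[i][j], dp[i][j - 1])
--             elif j == 0:
--                 dp[i][j] = min(matrix[i][j], dp[i - 1][j])
--             else:
--                 dp[i][j] = max(min(dp[i-1][j], matrix[i][j]), min(dp[i][j-1], matrix[i][j]))
--
--     return dp[-1][-1]
-- ===== SOURCE B (Python) =====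
-- def func(matrix):
--     if not matrix or not matrix[0]:
--         return 0
--     n, m = len(matrix), len(matrix[0])
--     memo = {}
--
--     def best(i, j):
--         if (i, j) in memo:
--             return memo[(i, j)]
--         v = matrix[i][j]
--         if i == 0 and j == 0:
--             r = v
--         elif i == 0:
--             r = min(v, best(0, j - 1))
--         elif j == 0:
--             r = min(v, best(i - 1, 0))
--         else:
--             r = max(min(best(i - 1, j), v), min(best(i, j - 1), v))
--         memo[(i, j)] = r
--         return r
--
--     return best(n - 1, m - 1)
-- ===== Notes on version B (the rewrite author's own statement) =====
-- stated objective: alternative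
-- what changed: Replaces A's bottom-up row-major DP table fill with top-down memoized recursion best(i,j) from the target cell, caching results in a dict.
import Mathlib
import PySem

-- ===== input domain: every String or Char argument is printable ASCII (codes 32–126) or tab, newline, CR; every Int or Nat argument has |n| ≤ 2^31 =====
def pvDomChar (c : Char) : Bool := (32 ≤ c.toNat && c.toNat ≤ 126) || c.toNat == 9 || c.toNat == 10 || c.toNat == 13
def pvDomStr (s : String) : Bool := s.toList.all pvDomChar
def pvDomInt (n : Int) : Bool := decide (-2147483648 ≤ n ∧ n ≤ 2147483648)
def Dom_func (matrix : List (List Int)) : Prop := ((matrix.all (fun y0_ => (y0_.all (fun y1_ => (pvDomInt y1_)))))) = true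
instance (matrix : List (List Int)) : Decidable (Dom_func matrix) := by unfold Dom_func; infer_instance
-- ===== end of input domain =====

-- B replaces A's bottom-up row-major DP table fill with top-down memoized recursion from the
-- target cell (the memo only caches: the returned values agree on Pre_).

-- shared indexing helper: matrix[i][j] (in range on every Pre_ input, where Python indexing succeeds)
def mget (matrix : List (List Int)) (i j : Nat) : Int := (matrix.getD i []).getD j 0

-- ===== PORT A =====
-- dp[i][j] = v
def dpSet (dp : List (List Int)) (i j : Nat) (v : Int) : List (List Int) :=
  dp.set i ((dp.getD i []).set j v)

-- body of A's inner loop for cell (i, j)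
def stepA (matrix dp : List (List Int)) (i j : Nat) : List (List Int) :=
  let v :=
    if i = 0 ∧ j = 0 then mget matrix i j
    else if i = 0 then min (mget matrix i j) (mget dp i (j - 1))
    else if j = 0 then min (mget matrix i j) (mget dp (i - 1) j)
    else max (min (mget dp (i - 1) j) (mget matrix i j))
             (min (mget dp i (j - 1)) (mget matrix i j))
  dpSet dp i j v

def func (matrix : List (List Int)) : Int :=
  match matrix with
  | [] => 0
  | r0 :: _ =>
    if r0.length = 0 then 0
    else
      let n := matrix.length
      let m := r0.length
      let dp0 := List.replicate n (List.replicate m (0 : Int))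
      let dp := (List.range n).foldl
        (fun dp i => (List.range m).foldl (fun dp j => stepA matrix dp i j) dp) dp0
      mget dp (n - 1) (m - 1)

-- ===== PORT B =====
-- B's memoized recursion best(i, j); the memo dict is pure caching, so the port is the
-- recursion itself, branch for branch in B's order (corner / first row / first column / interior)
def bestB (matrix : List (List Int)) : Nat → Nat → Int
  | 0, 0 => mget matrix 0 0
  | 0, j + 1 => min (mget matrix 0 (j + 1)) (bestB matrix 0 j)
  | i + 1, 0 => min (mget matrix (i + 1) 0) (bestB matrix i 0)
  | i + 1, j + 1 =>
      max (min (bestB matrix i (j + 1)) (mget matrix (i + 1) (j + 1)))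
          (min (bestB matrix (i + 1) j) (mget matrix (i + 1) (j + 1)))

def func_alt (matrix : List (List Int)) : Int :=
  match matrix with
  | [] => 0
  | r0 :: _ =>
    if r0.length = 0 then 0
    else bestB matrix (matrix.length - 1) (r0.length - 1)

-- ===== PRECONDITION & SPEC =====
-- Pre_ excludes ragged matrices in which some row is shorter than the first row:
-- there Python A (and Python B) raises IndexError instead of returning.
def Pre_func (matrix : List (List Int)) : Prop :=
  ∀ row ∈ matrix, (matrix.headD []).length ≤ row.length
instance (matrix : List (List Int)) : Decidable (Pre_func matrix) := by
  unfold Pre_func; infer_instance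

def pvWitness_func : List (List Int) := [[5, 1], [4, 5]]

def Spec_func (matrix : List (List Int)) (out : Int) : Prop := out = func_alt matrix
instance (matrix : List (List Int)) (out : Int) : Decidable (Spec_func matrix out) := by
  unfold Spec_func; infer_instance

-- ===== CLAIM (what is proved, stated in full; the proofs are below) =====
def Claim_equal_func : Prop :=
  ∀ (matrix : List (List Int)), Dom_func matrix → Pre_func matrix → Spec_func matrix (func matrix)

-- ===== LEMMAS AND PROOFS =====

lemma mget_dpSet (dp : List (List Int)) (i j i' j' : Nat) (v : Int)
    (hi : i < dp.length) (hj : j < (dp.getD i []).length) :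
    mget (dpSet dp i j v) i' j' = if i' = i ∧ j' = j then v else mget dp i' j' := by
  unfold mget dpSet
  by_cases hii : i' = i
  · subst hii
    have hrow : (dp.set i' ((dp.getD i' []).set j v)).getD i' [] = (dp.getD i' []).set j v := by
      rw [List.getD_eq_getElem?_getD, List.getElem?_set_self (by omega)]; simp
    rw [hrow]
    by_cases hjj : j' = j
    · subst hjj
      simp only [List.getD_eq_getElem?_getD] at hj ⊢
      rw [List.getElem?_set_self (by simpa using hj)]
      simp
    · simp [hjj, List.getD_eq_getElem?_getD, List.getElem?_set_ne (by omega : j ≠ j')]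
  · simp [hii, List.getD_eq_getElem?_getD, List.getElem?_set_ne (by omega : i ≠ i')]

-- A-side invariant after having filled rows < r completely and row r's first c cells
def InvA (matrix : List (List Int)) (n m r c : Nat) (dp : List (List Int)) : Prop :=
  dp.length = n ∧ (∀ i, i < n → (dp.getD i []).length = m) ∧
  ∀ i j, i < n → j < m →
    mget dp i j = if i < r ∨ (i = r ∧ j < c) then bestB matrix i j else 0

lemma invA_step (matrix : List (List Int)) (n m r c : Nat) (dp : List (List Int))
    (hr : r < n) (hc : c < m) (h : InvA matrix n m r c dp) :
    InvA matrix n m r (c + 1) (stepA matrix dp r c) := by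
  obtain ⟨hlen, hrows, hval⟩ := h
  have hdp : r < dp.length := by omega
  have hrow : c < (dp.getD r []).length := by rw [hrows r hr]; exact hc
  have hbest : (if r = 0 ∧ c = 0 then mget matrix r c
      else if r = 0 then min (mget matrix r c) (mget dp r (c - 1))
      else if c = 0 then min (mget matrix r c) (mget dp (r - 1) c)
      else max (min (mget dp (r - 1) c) (mget matrix r c))
               (min (mget dp r (c - 1)) (mget matrix r c)))
        = bestB matrix r c := by
    rcases r with _ | r' <;> rcases c with _ | c'
    · simp [bestB]
    · have h1 := hval 0 c' hr (by omega)
      rw [if_pos (by omega)] at h1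
      simp [bestB, h1]
    · have h1 := hval r' 0 (by omega) hc
      rw [if_pos (by omega)] at h1
      simp [bestB, h1]
    · have h1 := hval r' (c' + 1) (by omega) hc
      have h2 := hval (r' + 1) c' hr (by omega)
      rw [if_pos (by omega)] at h1
      rw [if_pos (by omega)] at h2
      simp [bestB, h1, h2]
  refine ⟨?_, ?_, ?_⟩
  · simp [stepA, dpSet, hlen]
  · intro i hi
    have : ((stepA matrix dp r c).getD i []).length = ((dpSet dp r c
        (if r = 0 ∧ c = 0 then mget matrix r c
         else if r = 0 then min (mget matrix r c) (mget dp r (c - 1))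
         else if c = 0 then min (mget matrix r c) (mget dp (r - 1) c)
         else max (min (mget dp (r - 1) c) (mget matrix r c))
                  (min (mget dp r (c - 1)) (mget matrix r c)))).getD i []).length := rfl
    rw [this]
    unfold dpSet
    by_cases hii : i = r
    · subst hii
      rw [List.getD_eq_getElem?_getD, List.getElem?_set_self (by omega)]
      simpa using hrows i hi
    · rw [List.getD_eq_getElem?_getD, List.getElem?_set_ne (by omega : r ≠ i)]
      rw [← List.getD_eq_getElem?_getD]
      exact hrows i hi
  · intro i j hi hj
    have hst : mget (stepA matrix dp r c) i j = if i = r ∧ j = c then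
        (if r = 0 ∧ c = 0 then mget matrix r c
         else if r = 0 then min (mget matrix r c) (mget dp r (c - 1))
         else if c = 0 then min (mget matrix r c) (mget dp (r - 1) c)
         else max (min (mget dp (r - 1) c) (mget matrix r c))
                  (min (mget dp r (c - 1)) (mget matrix r c)))
        else mget dp i j := mget_dpSet dp r c i j _ hdp hrow
    rw [hst]
    by_cases hij : i = r ∧ j = c
    · rw [if_pos hij, hbest, hij.1, hij.2]
      rw [if_pos (by omega)]
    · rw [if_neg hij, hval i j hi hj]
      by_cases hcond : i < r ∨ (i = r ∧ j < c)
      · rw [if_pos hcond, if_pos (by omega)]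
      · rw [if_neg hcond, if_neg (by omega)]

lemma invA_inner (matrix : List (List Int)) (n m r : Nat) (dp : List (List Int))
    (hr : r < n) (h : InvA matrix n m r 0 dp) :
    ∀ c, c ≤ m → InvA matrix n m r c
      ((List.range c).foldl (fun dp j => stepA matrix dp r j) dp) := by
  intro c
  induction c with
  | zero => intro _; simpa using h
  | succ c ih =>
      intro hc1
      rw [List.range_succ, List.foldl_append]
      simp only [List.foldl_cons, List.foldl_nil]
      exact invA_step matrix n m r c _ hr (by omega) (ih (by omega))

lemma invA_shift (matrix : List (List Int)) (n m r : Nat) (dp : List (List Int))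
    (h : InvA matrix n m r m dp) : InvA matrix n m (r + 1) 0 dp := by
  obtain ⟨hlen, hrows, hval⟩ := h
  refine ⟨hlen, hrows, ?_⟩
  intro i j hi hj
  rw [hval i j hi hj]
  by_cases hcond : i < r ∨ (i = r ∧ j < m)
  · rw [if_pos hcond, if_pos (by omega)]
  · rw [if_neg hcond, if_neg (by omega)]

lemma invA_outer (matrix : List (List Int)) (n m : Nat) (dp : List (List Int))
    (h : InvA matrix n m 0 0 dp) :
    ∀ r, r ≤ n → InvA matrix n m r 0
      ((List.range r).foldl
        (fun dp i => (List.range m).foldl (fun dp j => stepA matrix dp i j) dp) dp) := by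
  intro r
  induction r with
  | zero => intro _; simpa using h
  | succ r ih =>
      intro hr1
      rw [List.range_succ, List.foldl_append]
      simp only [List.foldl_cons, List.foldl_nil]
      exact invA_shift matrix n m r _
        (invA_inner matrix n m r _ (by omega) (ih (by omega)) m le_rfl)

lemma func_eq_bestB (matrix : List (List Int)) (hne : matrix ≠ [])
    (hm : (matrix.headD []).length ≠ 0) :
    func matrix = bestB matrix (matrix.length - 1) ((matrix.headD []).length - 1) := by
  cases matrix with
  | nil => exact absurd rfl hne
  | cons r0 rest =>
    have hm0 : r0.length ≠ 0 := by simpa using hm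
    have hbase : InvA (r0 :: rest) (r0 :: rest).length r0.length 0 0
        (List.replicate (r0 :: rest).length (List.replicate r0.length (0 : Int))) := by
      refine ⟨by simp, ?_, ?_⟩
      · intro i hi
        simp only [List.length_cons] at hi
        rw [List.getD_eq_getElem?_getD, List.getElem?_replicate]
        simp [show i ≤ rest.length from by omega]
      · intro i j hi hj
        simp only [List.length_cons] at hi
        rw [if_neg (by omega)]
        simp [mget, List.getD_eq_getElem?_getD,
          show i ≤ rest.length from by omega, hj]
    have hfin := invA_outer (r0 :: rest) (r0 :: rest).length r0.length _ hbase
      (r0 :: rest).length le_rfl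
    obtain ⟨_, _, hval⟩ := hfin
    have hv := hval ((r0 :: rest).length - 1) (r0.length - 1) (by simp) (by omega)
    rw [if_pos (by simp only [List.length_cons]; omega)] at hv
    simp only [func, List.headD_cons]
    rw [if_neg hm0]
    exact hv

-- ===== VERDICT (by name: the statement is the Claim_ definition above) =====
theorem func_spec : Claim_equal_func := by
  intro matrix _ _
  unfold Spec_func
  match hmat : matrix with
  | [] => rfl
  | r0 :: rest =>
    by_cases hm : r0.length = 0
    · simp [func, func_alt, hm]
    · rw [func_eq_bestB (r0 :: rest) (by simp) (by simpa using hm)]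
      simp [func_alt, hm]
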